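-- pv_equiv track=rewrite | github.com/zura7cinco7/goa | Level 052/Classwork/Classwork.py | highest_rank
-- ===== SOURCE A (Python) =====
-- def highest_rank(arr):
--     result = [arr[0]]
--
--     count = arr.count(arr[0])
--
--     for i in arr[1:]:
--         if arr.count(i) > count:
--             count = arr.count(i)
--             result = [i]
--         elif arr.count(i) == count:
--             result.append(i)
--     return max(result)
-- ===== SOURCE B (Python) =====
-- def highest_rank(arr):
--     freq = {}
--     for x in arr:
--         freq[x] = freq.get(x, 0) + 1
--     best = arr[0]
--     best_c = freq[best]
--     for v, c in freq.items():
--         if c > best_c or (c == best_c and v > best):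
--             best, best_c = v, c
--     return best
-- ===== Notes on version B (the rewrite author's own statement) =====
-- stated objective: faster
-- what changed: A rescans the whole list with arr.count for every element (quadratic) and accumulates a result list; B builds a frequency dict in one pass and then takes the lexicographic maximum of (count, value) in a single pass over the distinct keys.
import Mathlib
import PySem

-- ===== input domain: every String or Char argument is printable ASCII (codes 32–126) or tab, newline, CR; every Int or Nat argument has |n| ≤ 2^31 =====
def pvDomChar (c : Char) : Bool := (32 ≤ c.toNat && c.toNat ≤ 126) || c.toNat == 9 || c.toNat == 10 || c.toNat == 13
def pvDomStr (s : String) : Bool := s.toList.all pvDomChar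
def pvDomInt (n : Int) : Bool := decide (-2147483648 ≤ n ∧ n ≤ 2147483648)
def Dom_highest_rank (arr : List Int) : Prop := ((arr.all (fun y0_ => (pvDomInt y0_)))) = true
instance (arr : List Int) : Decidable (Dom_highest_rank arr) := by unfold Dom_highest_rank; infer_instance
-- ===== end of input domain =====

-- B replaces A's repeated arr.count scans with a one-pass frequency dict plus a
-- single lex-max pass over the distinct keys (objective: faster).

-- ===== PORT A =====
-- loop body of A: reset on strictly larger count, append on equal count
def hrStepA (arr : List Int) (s : List Int × Int) (i : Int) : List Int × Int :=
  if (PySem.List.count arr i : Int) > s.2 then ([i], (PySem.List.count arr i : Int))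
  else if (PySem.List.count arr i : Int) = s.2 then (s.1 ++ [i], s.2)
  else s

def highest_rank (arr : List Int) : Int :=
  match arr with
  | [] => 0  -- Python: arr[0] raises IndexError; excluded by Pre_
  | a :: _ =>
    let st := (PySem.List.slice arr (some 1) none).foldl (hrStepA arr)
                ([a], (PySem.List.count arr a : Int))
    match PySem.List.max? st.1 (fun x => x) with
    | some m => m
    | none => 0  -- unreachable: result is never empty

-- ===== PORT B =====
-- loop body of B: take the new (value, count) pair when it is lex-larger as (count, value)
def hrStepB (s : Int × Int) (p : Int × Int) : Int × Int :=
  match s, p with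
  | (best, best_c), (v, c) =>
    if c > best_c ∨ (c = best_c ∧ v > best) then (v, c) else (best, best_c)

def highest_rank_alt (arr : List Int) : Int :=
  let freq := arr.foldl (fun d x => d.insert x (d.getD x 0 + 1)) PySem.Dict.empty
  match arr with
  | [] => 0  -- Python: arr[0] raises IndexError; excluded by Pre_
  | a :: _ =>
    -- freq[best]: a is always a key of freq here, so getD with default 0 is exact
    (freq.items.foldl hrStepB (a, freq.getD a 0)).1

-- ===== PRECONDITION & SPEC =====
-- A raises IndexError on the empty list (arr[0]); that is its only exception.
def Pre_highest_rank (arr : List Int) : Prop := arr ≠ []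
instance (arr : List Int) : Decidable (Pre_highest_rank arr) := by
  unfold Pre_highest_rank; infer_instance

def pvWitness_highest_rank : List Int := ([1, 2, 2, 3])

def Spec_highest_rank (arr : List Int) (out : Int) : Prop := out = highest_rank_alt arr
instance (arr : List Int) (out : Int) : Decidable (Spec_highest_rank arr out) := by
  unfold Spec_highest_rank; infer_instance

-- ===== CLAIM (what is proved, stated in full; the proofs are below) =====
def Claim_equal_highest_rank : Prop := ∀ (arr : List Int), Dom_highest_rank arr → Pre_highest_rank arr → Spec_highest_rank arr (highest_rank arr)

-- ===== LEMMAS AND PROOFS =====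

-- the running maximal count (in arr) of the elements of l
def hrMc (arr l : List Int) : Int :=
  l.foldl (fun m x => max m (List.count x arr : Int)) 0

theorem hrMc_append_singleton (arr l : List Int) (i : Int) :
    hrMc arr (l ++ [i]) = max (hrMc arr l) (List.count i arr : Int) := by
  simp [hrMc]

theorem le_hrMc (arr l : List Int) (x : Int) (hx : x ∈ l) :
    (List.count x arr : Int) ≤ hrMc arr l := by
  induction l using List.reverseRecOn with
  | nil => simp at hx
  | append_singleton l i ih =>
    rw [hrMc_append_singleton]
    rcases List.mem_append.1 hx with h | h
    · exact le_trans (ih h) (le_max_left _ _)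
    · simp at h; subst h; exact le_max_right _ _

theorem hrMc_attained (arr l : List Int) :
    hrMc arr l = 0 ∨ ∃ x ∈ l, (List.count x arr : Int) = hrMc arr l := by
  induction l using List.reverseRecOn with
  | nil => left; simp [hrMc]
  | append_singleton l i ih =>
    rw [hrMc_append_singleton]
    by_cases h : hrMc arr l ≤ (List.count i arr : Int)
    · right; exact ⟨i, by simp, by omega⟩
    · rcases ih with h0 | ⟨x, hx, he⟩
      · left; omega
      · right; exact ⟨x, by simp [hx], by omega⟩

-- A's loop invariant: the state is (all processed elements of maximal count, that count)
theorem foldA_inv (arr : List Int) : ∀ (post l : List Int),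
    post.foldl (hrStepA arr)
        (l.filter (fun x => (List.count x arr : Int) = hrMc arr l), hrMc arr l)
      = ((l ++ post).filter (fun x => (List.count x arr : Int) = hrMc arr (l ++ post)),
         hrMc arr (l ++ post)) := by
  intro post
  induction post with
  | nil => intro l; simp only [List.foldl_nil, List.append_nil]
  | cons i post ih =>
    intro l
    have hkey : hrStepA arr
        (l.filter (fun x => (List.count x arr : Int) = hrMc arr l), hrMc arr l) i
        = ((l ++ [i]).filter (fun x => (List.count x arr : Int) = hrMc arr (l ++ [i])),
           hrMc arr (l ++ [i])) := by
      have hcnt : (PySem.List.count arr i : Int) = (List.count i arr : Int) := by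
        rw [PySem.List.count_eq]
      unfold hrStepA
      rw [hcnt]
      rcases lt_trichotomy (hrMc arr l) (List.count i arr : Int) with h | h | h
      · have hm : hrMc arr (l ++ [i]) = (List.count i arr : Int) := by
          rw [hrMc_append_singleton]; omega
        have hf : l.filter (fun x => (List.count x arr : Int) = hrMc arr (l ++ [i])) = [] := by
          apply List.filter_eq_nil_iff.2
          intro x hx hcx
          have hle := le_hrMc arr l x hx
          rw [hm] at hcx
          simp only [decide_eq_true_eq] at hcx
          omega
        rw [hm] at hf
        rw [if_pos h, hm, List.filter_append, hf, List.nil_append]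
        simp
      · have hm : hrMc arr (l ++ [i]) = hrMc arr l := by rw [hrMc_append_singleton]; omega
        rw [if_neg (by omega), if_pos h.symm, hm, List.filter_append]
        have : List.filter (fun x => decide ((List.count x arr : Int) = hrMc arr l)) [i]
            = [i] := by simp [← h]
        rw [this]
      · have hm : hrMc arr (l ++ [i]) = hrMc arr l := by rw [hrMc_append_singleton]; omega
        rw [if_neg (by omega), if_neg (by omega), hm, List.filter_append]
        have : List.filter (fun x => decide ((List.count x arr : Int) = hrMc arr l)) [i]
            = [] := by simp; omega
        rw [this, List.append_nil]
    rw [List.foldl_cons, hkey, ih (l ++ [i]), List.append_assoc]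
    rfl

-- the B-side dominance order: lexicographic on (count, value)
def hrDom (arr : List Int) (b v : Int) : Prop :=
  (List.count v arr : Int) < (List.count b arr : Int) ∨
    ((List.count v arr : Int) = (List.count b arr : Int) ∧ v ≤ b)

theorem hrDom_refl (arr : List Int) (b : Int) : hrDom arr b b := Or.inr ⟨rfl, le_refl b⟩

theorem hrDom_trans (arr : List Int) {a b c : Int}
    (h1 : hrDom arr a b) (h2 : hrDom arr b c) : hrDom arr a c := by
  unfold hrDom at *; omega

theorem hrStepB_pos (b cb k ck : Int) (h : ck > cb ∨ (ck = cb ∧ k > b)) :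
    hrStepB (b, cb) (k, ck) = (k, ck) := by
  show (if ck > cb ∨ (ck = cb ∧ k > b) then (k, ck) else (b, cb)) = (k, ck)
  rw [if_pos h]

theorem hrStepB_neg (b cb k ck : Int) (h : ¬ (ck > cb ∨ (ck = cb ∧ k > b))) :
    hrStepB (b, cb) (k, ck) = (b, cb) := by
  show (if ck > cb ∨ (ck = cb ∧ k > b) then (k, ck) else (b, cb)) = (b, cb)
  rw [if_neg h]

-- B's loop invariant: the state is a key of b :: ks paired with its count in arr,
-- and it dominates every element of b :: ks
theorem foldB_inv (arr : List Int) : ∀ (ks : List Int) (b : Int),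
    ((ks.map (fun k => (k, (List.count k arr : Int)))).foldl hrStepB
        (b, (List.count b arr : Int))).1 ∈ b :: ks ∧
    ∀ v ∈ b :: ks, hrDom arr
        (((ks.map (fun k => (k, (List.count k arr : Int)))).foldl hrStepB
          (b, (List.count b arr : Int))).1) v := by
  intro ks
  induction ks with
  | nil =>
    intro b
    refine ⟨by simp, ?_⟩
    intro v hv
    rw [List.mem_singleton] at hv
    subst hv
    exact hrDom_refl arr v
  | cons k ks ih =>
    intro b
    by_cases hc : (List.count k arr : Int) > (List.count b arr : Int) ∨
        ((List.count k arr : Int) = (List.count b arr : Int) ∧ k > b)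
    · obtain ⟨h1, h3⟩ := ih k
      have hbk : hrDom arr k b := by unfold hrDom; omega
      refine ⟨?_, ?_⟩
      · simp only [List.map_cons, List.foldl_cons, hrStepB_pos _ _ _ _ hc]
        exact List.mem_cons_of_mem b h1
      · intro v hv
        simp only [List.map_cons, List.foldl_cons, hrStepB_pos _ _ _ _ hc]
        rcases List.mem_cons.1 hv with hvb | hv
        · subst hvb; exact hrDom_trans arr (h3 k (List.mem_cons_self)) hbk
        · exact h3 v hv
    · obtain ⟨h1, h3⟩ := ih b
      have hbk : hrDom arr b k := by
        unfold hrDom; push Not at hc; omega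
      refine ⟨?_, ?_⟩
      · simp only [List.map_cons, List.foldl_cons, hrStepB_neg _ _ _ _ hc]
        rcases List.mem_cons.1 h1 with hb | hb
        · rw [hb]; exact List.mem_cons_self
        · exact List.mem_cons_of_mem b (List.mem_cons_of_mem k hb)
      · intro v hv
        simp only [List.map_cons, List.foldl_cons, hrStepB_neg _ _ _ _ hc]
        rcases List.mem_cons.1 hv with hvb | hv
        · subst hvb; exact h3 v (List.mem_cons_self)
        · rcases List.mem_cons.1 hv with hvk | hv
          · subst hvk; exact hrDom_trans arr (h3 b (List.mem_cons_self)) hbk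
          · exact h3 v (List.mem_cons_of_mem b hv)

-- ===== VERDICT (by name: the statement is the Claim_ definition above) =====
theorem highest_rank_spec : Claim_equal_highest_rank := by
  intro arr _ hpre
  unfold Spec_highest_rank
  match harr : arr with
  | [] => exact absurd rfl hpre
  | a :: t =>
    -- ---------- the A side computes (filter of maximal-count elements, max count) ----------
    have hmemA : a ∈ a :: t := List.mem_cons_self
    have hca : 0 < List.count a (a :: t) := List.count_pos_iff.2 hmemA
    have h0 : hrMc (a :: t) [a] = (List.count a (a :: t) : Int) := by
      show max 0 (List.count a (a :: t) : Int) = _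
      exact max_eq_right (Int.natCast_nonneg _)
    have hinit : ([a], (PySem.List.count (a :: t) a : Int))
        = ([a].filter (fun x => (List.count x (a :: t) : Int) = hrMc (a :: t) [a]),
           hrMc (a :: t) [a]) := by
      rw [PySem.List.count_eq, h0]; simp
    have hst : (PySem.List.slice (a :: t) (some 1) none).foldl (hrStepA (a :: t))
          ([a], (PySem.List.count (a :: t) a : Int))
        = ((a :: t).filter (fun x => (List.count x (a :: t) : Int) = hrMc (a :: t) (a :: t)),
           hrMc (a :: t) (a :: t)) := by
      rw [PySem.List.slice_from_one, hinit]
      exact foldA_inv (a :: t) t [a]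
    have hA : highest_rank (a :: t)
        = (match PySem.List.max?
              ((a :: t).filter (fun x => (List.count x (a :: t) : Int) = hrMc (a :: t) (a :: t)))
              (fun x => x) with
           | some m => m
           | none => 0) := by
      show (match PySem.List.max?
              (((PySem.List.slice (a :: t) (some 1) none).foldl (hrStepA (a :: t))
                ([a], (PySem.List.count (a :: t) a : Int))).1) (fun x => x) with
            | some m => m
            | none => 0) = _
      rw [hst]
    -- the filtered list is nonempty, so max? returns some m
    have hge : (1 : Int) ≤ hrMc (a :: t) (a :: t) := by
      have h1 := le_hrMc (a :: t) (a :: t) a hmemA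
      omega
    obtain ⟨x0, hx0, he0⟩ :
        ∃ x ∈ a :: t, (List.count x (a :: t) : Int) = hrMc (a :: t) (a :: t) := by
      rcases hrMc_attained (a :: t) (a :: t) with h0' | h
      · omega
      · exact h
    obtain ⟨m, hm⟩ : ∃ m, PySem.List.max?
        ((a :: t).filter (fun x => (List.count x (a :: t) : Int) = hrMc (a :: t) (a :: t)))
        (fun x => x) = some m := by
      cases hmx : PySem.List.max?
          ((a :: t).filter (fun x => (List.count x (a :: t) : Int) = hrMc (a :: t) (a :: t)))
          (fun x => x) with
      | none =>
        exfalso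
        have hnil := (PySem.List.max?_eq_none_iff _ _).1 hmx
        have : x0 ∈ (a :: t).filter
            (fun x => (List.count x (a :: t) : Int) = hrMc (a :: t) (a :: t)) :=
          List.mem_filter.2 ⟨hx0, by simp [he0]⟩
        rw [hnil] at this
        exact List.not_mem_nil this
      | some m => exact ⟨m, rfl⟩
    have hmF := PySem.List.max?_mem hm
    have hmax := PySem.List.max?_isMax hm
    have hmarr : m ∈ a :: t := (List.mem_filter.1 hmF).1
    have hmc : (List.count m (a :: t) : Int) = hrMc (a :: t) (a :: t) := by
      have := (List.mem_filter.1 hmF).2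
      simpa using this
    -- ---------- the B side computes the lex-max (count, value) key ----------
    have hB : highest_rank_alt (a :: t)
        = ((((PySem.Set.ofList (a :: t)).map
              (fun k => (k, (List.count k (a :: t) : Int)))).foldl hrStepB
            (a, (List.count a (a :: t) : Int)))).1 := by
      show ((((a :: t).foldl (fun d x => d.insert x (d.getD x 0 + 1))
              PySem.Dict.empty).items).foldl hrStepB
            (a, ((a :: t).foldl (fun d x => d.insert x (d.getD x 0 + 1))
              PySem.Dict.empty).getD a 0)).1 = _
      rw [PySem.Dict.foldl_insert_getD_add_one_eq_counter, PySem.Dict.items_counter,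
          PySem.Dict.getD_counter]
    obtain ⟨hrmem, hdom⟩ := foldB_inv (a :: t) (PySem.Set.ofList (a :: t)) a
    set r := (((PySem.Set.ofList (a :: t)).map
        (fun k => (k, (List.count k (a :: t) : Int)))).foldl hrStepB
        (a, (List.count a (a :: t) : Int))).1 with hr
    have hrarr : r ∈ a :: t := by
      rcases List.mem_cons.1 hrmem with h | h
      · rw [h]; exact hmemA
      · exact (PySem.Set.mem_ofList _ _).1 h
    have hdomall : ∀ v ∈ a :: t, hrDom (a :: t) r v := by
      intro v hv
      exact hdom v (List.mem_cons_of_mem a ((PySem.Set.mem_ofList _ _).2 hv))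
    have hrc : (List.count r (a :: t) : Int) = hrMc (a :: t) (a :: t) := by
      have hle := le_hrMc (a :: t) (a :: t) r hrarr
      have hd := hdomall x0 hx0
      unfold hrDom at hd
      omega
    have hrF : r ∈ (a :: t).filter
        (fun x => (List.count x (a :: t) : Int) = hrMc (a :: t) (a :: t)) :=
      List.mem_filter.2 ⟨hrarr, by simp [hrc]⟩
    -- ---------- the two results coincide ----------
    have hmr : m = r := by
      have h1 : r ≤ m := hmax r hrF
      have hd := hdomall m hmarr
      unfold hrDom at hd
      omega
    rw [hA, hm, hB, hmr]
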